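-- pv_equiv track=rewrite | github.com/Balakrishna1988/Allianz | Allianze_Test.py | summarize_stats
-- ===== SOURCE A (Python) =====
-- def summarize_stats(data):
--     summary = {}
--     for year, team, wins, _ in data:
--         if year not in summary:
--             summary[year] = {"winner": (team, wins), "loser": (team, wins)}
--         else:
--             if wins > summary[year]["winner"][1]:
--                 summary[year]["winner"] = (team, wins)
--             if wins < summary[year]["loser"][1]:
--                 summary[year]["loser"] = (team, wins)
--
--     return [(year, s['winner'][0], s['winner'][1], s['loser'][0], s['loser'][1]) for year, s in summary.items()]
-- ===== SOURCE B (Python) =====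
-- def summarize_stats(data):
--     groups = {}
--     for year, team, wins, _ in data:
--         groups.setdefault(year, []).append((team, wins))
--     result = []
--     for year, rows in groups.items():
--         winner = max(rows, key=lambda r: r[1])
--         loser = min(rows, key=lambda r: r[1])
--         result.append((year, winner[0], winner[1], loser[0], loser[1]))
--     return result
-- ===== Notes on version B (the rewrite author's own statement) =====
-- stated objective: simpler
-- what changed: Instead of maintaining a running winner/loser record per year inside the scan, B only groups the rows by year in one pass and then computes each year's winner and loser with max/min (first-extremal, matching A's strict-comparison tie-breaking) in a second pass.
import Mathlib
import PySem

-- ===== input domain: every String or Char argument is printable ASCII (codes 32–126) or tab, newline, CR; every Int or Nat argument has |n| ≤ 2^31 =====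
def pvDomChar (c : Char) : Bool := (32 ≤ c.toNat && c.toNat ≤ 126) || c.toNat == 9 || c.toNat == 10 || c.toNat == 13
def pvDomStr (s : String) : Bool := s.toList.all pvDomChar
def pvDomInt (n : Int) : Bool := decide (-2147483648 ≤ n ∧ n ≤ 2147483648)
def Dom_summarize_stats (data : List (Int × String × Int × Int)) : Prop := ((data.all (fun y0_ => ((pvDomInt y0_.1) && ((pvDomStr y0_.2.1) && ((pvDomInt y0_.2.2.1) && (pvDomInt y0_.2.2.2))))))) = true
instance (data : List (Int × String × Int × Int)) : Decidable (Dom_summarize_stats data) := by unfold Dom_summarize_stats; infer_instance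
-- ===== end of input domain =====

-- B replaces A's in-scan running winner/loser records per year by a group-by-year pass
-- followed by max/min per group (objective: simpler two-phase decomposition).


-- ===== PORT A =====
-- A's inner dict {"winner": …, "loser": …} (fixed keys) is ported as the pair (winner, loser);
-- both branches of A's loop body store into summary[year], written here as one insert.
def stepA (s : PySem.Dict Int ((String × Int) × (String × Int)))
    (p : Int × String × Int × Int) : PySem.Dict Int ((String × Int) × (String × Int)) :=
  s.insert p.1
    (match s.get? p.1 with
     | none => ((p.2.1, p.2.2.1), (p.2.1, p.2.2.1))
     | some (w, l) =>
        ((if p.2.2.1 > w.2 then (p.2.1, p.2.2.1) else w),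
         (if p.2.2.1 < l.2 then (p.2.1, p.2.2.1) else l)))

def summarize_stats (data : List (Int × String × Int × Int)) : List (Int × String × Int × String × Int) :=
  (data.foldl stepA PySem.Dict.empty).items.map (fun q => (q.1, q.2.1.1, q.2.1.2, q.2.2.1, q.2.2.2))

-- ===== PORT B =====
-- groups.setdefault(year, []).append((team, wins)) is ported as Dict.modify year [] (· ++ [row]):
-- same resulting value and same insertion position of the key.
def stepB (d : PySem.Dict Int (List (String × Int)))
    (p : Int × String × Int × Int) : PySem.Dict Int (List (String × Int)) :=
  d.modify p.1 [] (fun rows => rows ++ [(p.2.1, p.2.2.1)])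

def summarize_stats_alt (data : List (Int × String × Int × Int)) : List (Int × String × Int × String × Int) :=
  (data.foldl stepB PySem.Dict.empty).items.map (fun q =>
    match PySem.List.max? q.2 (fun r => r.2), PySem.List.min? q.2 (fun r => r.2) with
    | some w, some l => (q.1, w.1, w.2, l.1, l.2)
    | _, _ => (q.1, "", 0, "", 0))  -- unreachable: every group is nonempty

-- ===== PRECONDITION & SPEC =====
def Spec_summarize_stats (data : List (Int × String × Int × Int)) (out : List (Int × String × Int × String × Int)) : Prop := out = summarize_stats_alt data
instance (data : List (Int × String × Int × Int)) (out : List (Int × String × Int × String × Int)) : Decidable (Spec_summarize_stats data out) := by unfold Spec_summarize_stats; infer_instance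

-- ===== CLAIM (what is proved, stated in full; the proofs are below) =====
def Claim_equal_summarize_stats : Prop := ∀ (data : List (Int × String × Int × Int)), Dom_summarize_stats data → Spec_summarize_stats data (summarize_stats data)

-- ===== LEMMAS AND PROOFS =====

-- running winner / loser selectors (A's two updates; also what max?/min? accumulate)
def wsel (w r : String × Int) : String × Int := if w.2 < r.2 then r else w
def lsel (l r : String × Int) : String × Int := if r.2 < l.2 then r else l

-- one step of A's per-year state, as a function of the row only
def pairStep (o : Option ((String × Int) × (String × Int))) (r : String × Int) :
    Option ((String × Int) × (String × Int)) :=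
  match o with
  | none => some (r, r)
  | some (w, l) => some (wsel w r, lsel l r)

lemma foldA_get? (data : List (Int × String × Int × Int))
    (d : PySem.Dict Int ((String × Int) × (String × Int))) (y : Int) :
    (data.foldl stepA d).get? y =
      ((data.filter (fun p => p.1 == y)).map (fun p => (p.2.1, p.2.2.1))).foldl pairStep (d.get? y) := by
  induction data generalizing d with
  | nil => rfl
  | cons p rest ih =>
    simp only [List.foldl_cons, ih, List.filter_cons]
    by_cases hy : p.1 = y
    · subst hy
      simp only [beq_self_eq_true, if_pos, List.map_cons, List.foldl_cons]
      congr 1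
      rw [stepA, PySem.Dict.get?_insert_self]
      cases h : d.get? p.1 with
      | none => simp [pairStep]
      | some wl =>
        obtain ⟨w, l⟩ := wl
        simp [pairStep, wsel, lsel]
    · have : (p.1 == y) = false := by simp [hy]
      simp only [this, Bool.false_eq_true, if_false]
      congr 1
      rw [stepA, PySem.Dict.get?_insert_of_ne _ _ (fun h => hy h.symm)]

lemma foldB_getD (data : List (Int × String × Int × Int)) (y : Int) :
    (data.foldl stepB PySem.Dict.empty).getD y [] =
      (data.filter (fun p => p.1 == y)).map (fun p => (p.2.1, p.2.2.1)) := by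
  have h := PySem.Dict.getD_foldl_modify_append
      (l := data.map (fun p => (p.1, (p.2.1, p.2.2.1))))
      (d := (PySem.Dict.empty : PySem.Dict Int (List (String × Int)))) (c := y)
  have e : data.foldl stepB (PySem.Dict.empty : PySem.Dict Int (List (String × Int))) =
      (data.map (fun p => (p.1, (p.2.1, p.2.2.1)))).foldl
        (fun d p => d.modify p.1 [] (fun rows => rows ++ [p.2])) PySem.Dict.empty := by
    rw [List.foldl_map]
    rfl
  rw [e, h]
  simp [PySem.Dict.getD_empty, List.filter_map, List.map_map, Function.comp_def]

lemma foldl_pairStep_some (rs : List (String × Int)) (w l : String × Int) :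
    rs.foldl pairStep (some (w, l)) = some (rs.foldl wsel w, rs.foldl lsel l) := by
  induction rs generalizing w l with
  | nil => rfl
  | cons r rs ih => simp only [List.foldl_cons, pairStep, ih]

lemma max?_cons_wsel (r : String × Int) (rs : List (String × Int)) :
    PySem.List.max? (r :: rs) (fun x => x.2) = some (rs.foldl wsel r) := by
  simp only [PySem.List.max?, List.foldl_cons]
  induction rs generalizing r with
  | nil => rfl
  | cons x rs ih => simp only [List.foldl_cons, wsel]; split <;> exact ih _

lemma min?_cons_lsel (r : String × Int) (rs : List (String × Int)) :
    PySem.List.min? (r :: rs) (fun x => x.2) = some (rs.foldl lsel r) := by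
  simp only [PySem.List.min?, List.foldl_cons]
  induction rs generalizing r with
  | nil => rfl
  | cons x rs ih => simp only [List.foldl_cons, lsel]; split <;> exact ih _

lemma keysA (data : List (Int × String × Int × Int)) :
    (data.foldl stepA PySem.Dict.empty).keys = PySem.Set.ofList (data.map (fun p => p.1)) := by
  have h := PySem.Dict.keys_foldl_insert_key (l := data) (key := fun p => p.1)
      (f := fun s p =>
        (match s.get? p.1 with
         | none => ((p.2.1, p.2.2.1), (p.2.1, p.2.2.1))
         | some (w, l) =>
            ((if p.2.2.1 > w.2 then (p.2.1, p.2.2.1) else w),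
             (if p.2.2.1 < l.2 then (p.2.1, p.2.2.1) else l))))
      (d := PySem.Dict.empty)
  simpa [stepA, PySem.Dict.keys_empty, PySem.Set.update_nil_left] using h

lemma keysB (data : List (Int × String × Int × Int)) :
    (data.foldl stepB PySem.Dict.empty).keys = PySem.Set.ofList (data.map (fun p => p.1)) := by
  have h := PySem.Dict.keys_foldl_modify_key (l := data) (key := fun p => p.1)
      (d0 := ([] : List (String × Int)))
      (f := fun (_ : PySem.Dict Int (List (String × Int))) p => (fun rows => rows ++ [(p.2.1, p.2.2.1)]))
      (d := PySem.Dict.empty)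
  simpa [stepB, PySem.Dict.keys_empty, PySem.Set.update_nil_left] using h

-- ===== VERDICT (by name: the statement is the Claim_ definition above) =====
theorem summarize_stats_spec : Claim_equal_summarize_stats := by
  intro data _
  unfold Spec_summarize_stats summarize_stats summarize_stats_alt
  have hkA := keysA data
  have hkB := keysB data
  have hndA : (data.foldl stepA PySem.Dict.empty).keys.Nodup := by
    rw [hkA]; exact PySem.Set.nodup_ofList _
  have hndB : (data.foldl stepB PySem.Dict.empty).keys.Nodup := by
    rw [hkB]; exact PySem.Set.nodup_ofList _
  rw [PySem.Dict.items_eq_map_keys _ hndA (("", 0), ("", 0)),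
      PySem.Dict.items_eq_map_keys _ hndB [], hkA, hkB, List.map_map, List.map_map]
  apply List.map_congr_left
  intro y hy
  have hmem : y ∈ data.map (fun p => p.1) := (PySem.Set.mem_ofList _ _).1 hy
  -- the group of y is nonempty
  have hA := foldA_get? data PySem.Dict.empty y
  rw [PySem.Dict.get?_empty] at hA
  have hB := foldB_getD data y
  set rows := (data.filter (fun p => p.1 == y)).map (fun p => (p.2.1, p.2.2.1)) with hrows
  cases hr : rows with
  | nil =>
    exfalso
    obtain ⟨p, hp, hpy⟩ := List.mem_map.1 hmem
    have : p ∈ data.filter (fun p => p.1 == y) := List.mem_filter.2 ⟨hp, by simp [hpy]⟩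
    have : (p.2.1, p.2.2.1) ∈ rows := by rw [hrows]; exact List.mem_map_of_mem this
    rw [hr] at this; exact absurd this (List.not_mem_nil)
  | cons r rs =>
    rw [hr] at hA hB
    simp only [List.foldl_cons, pairStep] at hA
    rw [foldl_pairStep_some] at hA
    simp only [Function.comp]
    rw [PySem.Dict.getD_eq_get?_getD, hA, hB, max?_cons_wsel, min?_cons_lsel]
    rfl
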